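-- pv_equiv track=rewrite | github.com/AndrewKirkovski/polish-typographic-keyboard-layout | extract_base.py | _ensure_dead_key_action
-- ===== SOURCE A (Python) =====
-- def _ensure_dead_key_action(data, dk_name):
--     """Ensure a dead key action exists, return its action ID."""
--     # Look for existing action that enters this dead key state
--     state_name = dk_name  # Birman uses the dk name directly as state
--     for action_id, whens in data["actions"].items():
--         for when in whens:
--             if when.get("state") == "none" and when.get("next") == state_name:
--                 return action_id
--
--     # Also check with state_ prefix
--     state_name2 = f"state_{dk_name}"
--     for action_id, whens in data["actions"].items():
--         for when in whens:
--             if when.get("state") == "none" and when.get("next") == state_name2: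
--                 return action_id
--
--     # Not found — create a new action
--     action_id = f"dk_{dk_name}"
--     data["actions"][action_id] = [{"state": "none", "next": state_name}]
--     return action_id
-- ===== SOURCE B (Python) =====
-- def _ensure_dead_key_action(data, dk_name):
--     """Ensure a dead key action exists, return its action ID."""
--     state_name2 = f"state_{dk_name}"
--     fallback = None
--     for action_id, whens in data["actions"].items():
--         for when in whens:
--             if when.get("state") != "none":
--                 continue
--             nxt = when.get("next")
--             if nxt == dk_name:
--                 return action_id
--             if nxt == state_name2 and fallback is None:
--                 fallback = action_id
--     if fallback is not None:
--         return fallback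
--     action_id = f"dk_{dk_name}"
--     data["actions"][action_id] = [{"state": "none", "next": dk_name}]
--     return action_id
-- ===== Notes on version B (the rewrite author's own statement) =====
-- stated objective: alternative
-- what changed: B replaces A's two full scans of data['actions'] (exact state name first, then the state_ prefix) by one fused pass that returns immediately on an exact match and carries the first state_-prefixed match as a deferred fallback, used only after the whole loop.
import Mathlib
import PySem

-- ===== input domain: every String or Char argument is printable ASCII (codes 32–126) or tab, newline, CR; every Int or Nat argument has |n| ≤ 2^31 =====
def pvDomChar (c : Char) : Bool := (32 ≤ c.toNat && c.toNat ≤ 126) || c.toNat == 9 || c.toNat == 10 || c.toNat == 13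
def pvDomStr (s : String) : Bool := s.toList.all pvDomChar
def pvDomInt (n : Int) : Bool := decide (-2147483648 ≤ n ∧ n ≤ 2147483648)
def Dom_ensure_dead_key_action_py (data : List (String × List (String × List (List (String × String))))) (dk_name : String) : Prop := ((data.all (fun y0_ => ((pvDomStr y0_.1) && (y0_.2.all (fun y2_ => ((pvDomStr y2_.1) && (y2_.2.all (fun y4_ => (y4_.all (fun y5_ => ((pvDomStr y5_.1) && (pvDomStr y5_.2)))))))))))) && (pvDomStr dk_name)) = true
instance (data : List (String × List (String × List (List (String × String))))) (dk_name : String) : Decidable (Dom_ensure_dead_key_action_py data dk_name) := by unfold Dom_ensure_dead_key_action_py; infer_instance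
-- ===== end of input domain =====

-- B fuses A's two scans over data["actions"] into one pass with a deferred fallback for the
-- 'state_'-prefixed match; both Pythons mutate data identically when creating a new action, and the
-- equivalence proved here is about the return value.

-- ===== PORT A =====
-- when.get(k): first-match lookup in the when association list
def pvGet (w : List (String × String)) (k : String) : Option String :=
  (w.find? (fun p => p.1 == k)).map (·.2)

-- A's 'for action_id, whens … for when in whens … return action_id' loop, one target state name
def pvFindEnter (actions : List (String × List (List (String × String)))) (target : String) : Option String :=
  match actions with
  | [] => none
  | (aid, whens) :: rest =>
    if whens.any (fun w => pvGet w "state" == some "none" && pvGet w "next" == some target) then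
      some aid
    else
      pvFindEnter rest target

def ensure_dead_key_action_py (data : List (String × List (String × List (List (String × String))))) (dk_name : String) : String :=
  match (data.find? (fun p => p.1 == "actions")).map (·.2) with
  | none => ""   -- data["actions"] raises KeyError in Python; excluded by Pre_
  | some actions =>
    match pvFindEnter actions dk_name with
    | some aid => aid
    | none =>
      match pvFindEnter actions ("state_" ++ dk_name) with
      | some aid => aid
      | none => "dk_" ++ dk_name   -- new action is inserted into data (mutation); return value only

-- ===== PORT B =====
-- B's inner 'for when in whens' loop: Sum.inl = immediate return, Sum.inr = loop ends with this fallback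
def pvScanWhens (whens : List (List (String × String))) (aid dk st2 : String) (fb : Option String) : Sum String (Option String) :=
  match whens with
  | [] => Sum.inr fb
  | w :: rest =>
    if pvGet w "state" ≠ some "none" then pvScanWhens rest aid dk st2 fb
    else if pvGet w "next" = some dk then Sum.inl aid
    else if pvGet w "next" = some st2 ∧ fb = none then pvScanWhens rest aid dk st2 (some aid)
    else pvScanWhens rest aid dk st2 fb

-- B's outer loop, threading the fallback through the actions
def pvScanActions (actions : List (String × List (List (String × String)))) (dk st2 : String) (fb : Option String) : Sum String (Option String) :=
  match actions with
  | [] => Sum.inr fb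
  | (aid, whens) :: rest =>
    match pvScanWhens whens aid dk st2 fb with
    | Sum.inl a => Sum.inl a
    | Sum.inr fb' => pvScanActions rest dk st2 fb'

def ensure_dead_key_action_py_alt (data : List (String × List (String × List (List (String × String))))) (dk_name : String) : String :=
  match (data.find? (fun p => p.1 == "actions")).map (·.2) with
  | none => ""   -- KeyError in Python; excluded by Pre_
  | some actions =>
    match pvScanActions actions dk_name ("state_" ++ dk_name) none with
    | Sum.inl a => a
    | Sum.inr (some fb) => fb
    | Sum.inr none => "dk_" ++ dk_name

-- ===== PRECONDITION & SPEC =====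
-- Pre_ excludes exactly the inputs without an "actions" key, on which data["actions"] raises KeyError in both Pythons.
def Pre_ensure_dead_key_action_py (data : List (String × List (String × List (List (String × String))))) (dk_name : String) : Prop :=
  (data.find? (fun p => p.1 == "actions")).isSome = true

instance (data : List (String × List (String × List (List (String × String))))) (dk_name : String) : Decidable (Pre_ensure_dead_key_action_py data dk_name) := by unfold Pre_ensure_dead_key_action_py; infer_instance

def pvWitness_ensure_dead_key_action_py : (List (String × List (String × List (List (String × String))))) × String :=
  ([("actions", [("a0", [[("state", "none"), ("next", "x")]])])], "x")

def Spec_ensure_dead_key_action_py (data : List (String × List (String × List (List (String × String))))) (dk_name : String) (out : String) : Prop := out = ensure_dead_key_action_py_alt data dk_name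
instance (data : List (String × List (String × List (List (String × String))))) (dk_name : String) (out : String) : Decidable (Spec_ensure_dead_key_action_py data dk_name out) := by unfold Spec_ensure_dead_key_action_py; infer_instance

-- ===== CLAIM (what is proved, stated in full; the proofs are below) =====
def Claim_equal_ensure_dead_key_action_py : Prop := ∀ (data : List (String × List (String × List (List (String × String))))) (dk_name : String), Dom_ensure_dead_key_action_py data dk_name → Pre_ensure_dead_key_action_py data dk_name → Spec_ensure_dead_key_action_py data dk_name (ensure_dead_key_action_py data dk_name)

-- ===== LEMMAS AND PROOFS =====

-- B's inner loop characterised: immediate return iff some when matches the exact state name,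
-- otherwise the fallback becomes the old one or (if none) the action id when a state_-match exists.
lemma pvScanWhens_eq (whens : List (List (String × String))) (aid dk st2 : String) (fb : Option String) :
    pvScanWhens whens aid dk st2 fb =
      if whens.any (fun w => pvGet w "state" == some "none" && pvGet w "next" == some dk) then
        Sum.inl aid
      else
        Sum.inr (fb.or (if whens.any (fun w => pvGet w "state" == some "none" && pvGet w "next" == some st2) then some aid else none)) := by
  induction whens generalizing fb with
  | nil => cases fb <;> simp [pvScanWhens]
  | cons w rest ih =>
    simp only [pvScanWhens, List.any_cons]
    by_cases hs : pvGet w "state" = some "none"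
    · by_cases hd : pvGet w "next" = some dk
      · simp [hs, hd]
      · by_cases ht : pvGet w "next" = some st2
        · have hne : ¬ st2 = dk := fun e => hd (e ▸ ht)
          cases fb with
          | none =>
            rw [if_neg (by simp [hs]), if_neg hd, if_pos ⟨ht, rfl⟩, ih]
            simp [hs, ht, hne]
          | some x =>
            rw [if_neg (by simp [hs]), if_neg hd, if_neg (by simp), ih]
            simp [hs, hd, hne]
        · rw [if_neg (by simp [hs]), if_neg hd, if_neg (by simp [ht]), ih]
          simp [hs, hd, ht]
    · rw [if_pos (by simp [hs]), ih]
      simp [hs]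

-- B's outer loop characterised by A's two searches.
lemma pvScanActions_eq (actions : List (String × List (List (String × String)))) (dk st2 : String) (fb : Option String) :
    pvScanActions actions dk st2 fb =
      match pvFindEnter actions dk with
      | some a => Sum.inl a
      | none => Sum.inr (fb.or (pvFindEnter actions st2)) := by
  induction actions generalizing fb with
  | nil => simp [pvScanActions, pvFindEnter]
  | cons p rest ih =>
    obtain ⟨aid, whens⟩ := p
    simp only [pvScanActions, pvFindEnter, pvScanWhens_eq]
    by_cases hd : whens.any (fun w => pvGet w "state" == some "none" && pvGet w "next" == some dk)
    · simp [hd]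
    · simp only [hd, Bool.false_eq_true, if_false]
      rw [ih]
      by_cases ht : whens.any (fun w => pvGet w "state" == some "none" && pvGet w "next" == some st2)
      · simp only [ht, if_true]
        cases pvFindEnter rest dk <;> cases fb <;> simp
      · simp only [ht, Bool.false_eq_true, if_false]
        cases pvFindEnter rest dk <;> cases fb <;> simp

-- ===== VERDICT (by name: the statement is the Claim_ definition above) =====
theorem ensure_dead_key_action_py_spec : Claim_equal_ensure_dead_key_action_py := by
  intro data dk_name _ _
  unfold Spec_ensure_dead_key_action_py ensure_dead_key_action_py ensure_dead_key_action_py_alt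
  cases h : (data.find? (fun p => p.1 == "actions")).map (·.2) with
  | none => rfl
  | some actions =>
    simp only [pvScanActions_eq]
    cases hd : pvFindEnter actions dk_name with
    | some a => rfl
    | none =>
      cases ht : pvFindEnter actions ("state_" ++ dk_name) <;> simp
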